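-- pv_equiv track=rewrite | github.com/superhen/A-Basic-Information-Retrieval-System-Using-Inverted-Index | Unoptimized/IR.py | posting
-- ===== SOURCE A (Python) =====
-- def posting(sortedToken):
--     invertedIndex = {}
--     for tokenPair in sortedToken:
--         token = list(tokenPair.keys())[0]
--         if token not in invertedIndex:
--             invertedIndex[token] = [(tokenPair[token])]
--         elif (token in invertedIndex) & (tokenPair[token] not in set(invertedIndex[token])):
--             invertedIndex[token].append(tokenPair[token])
--     return invertedIndex
-- ===== SOURCE B (Python) =====
-- def posting(sortedToken):
--     groups = {}
--     for tokenPair in sortedToken: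
--         token = list(tokenPair.keys())[0]
--         groups.setdefault(token, []).append(tokenPair[token])
--     return {token: list(dict.fromkeys(posts)) for token, posts in groups.items()}
-- ===== Notes on version B (the rewrite author's own statement) =====
-- stated objective: alternative
-- what changed: B groups all postings per token in one pass with setdefault/append (keeping duplicates) and then dedups each group with dict.fromkeys in a second pass, instead of A's per-step membership test against a set of the already-stored postings.
-- outside the precondition, e.g. on posting([{}]): A raises IndexError, B raises IndexError
import Mathlib
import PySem

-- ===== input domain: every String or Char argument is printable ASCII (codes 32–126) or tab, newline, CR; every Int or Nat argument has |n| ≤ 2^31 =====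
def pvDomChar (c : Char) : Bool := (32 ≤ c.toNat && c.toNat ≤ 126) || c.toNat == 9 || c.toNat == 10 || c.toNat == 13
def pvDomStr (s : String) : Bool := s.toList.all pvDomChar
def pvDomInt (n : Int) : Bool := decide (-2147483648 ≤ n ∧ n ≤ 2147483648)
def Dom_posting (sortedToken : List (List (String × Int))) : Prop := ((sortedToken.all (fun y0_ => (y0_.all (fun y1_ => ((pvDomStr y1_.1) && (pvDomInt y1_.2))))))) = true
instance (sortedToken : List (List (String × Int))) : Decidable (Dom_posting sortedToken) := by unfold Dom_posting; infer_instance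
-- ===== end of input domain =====

-- B groups all postings per token in one pass and dedups each group afterwards (different decomposition: group-then-dedup instead of dedup-while-inserting); return values are proved equal.


-- ===== PORT A =====
-- one loop step of A: token = list(tokenPair.keys())[0]; insert [v] if fresh, append v if not yet present
def postingStepA (inv : PySem.Dict String (List Int)) (tokenPair : List (String × Int)) :
    PySem.Dict String (List Int) :=
  match PySem.List.pyGet? (PySem.Dict.ofList tokenPair).keys 0 with
  | none => inv      -- Python raises IndexError here (empty dict); excluded by Pre_posting
  | some token =>
    let v := (PySem.Dict.ofList tokenPair).getD token 0   -- tokenPair[token]; token is a key, so never KeyError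
    if inv.contains token = false then
      inv.insert token [v]
    else if (inv.contains token && !((PySem.Set.ofList (inv.getD token [])).contains v)) = true then
      inv.modify token [] (fun l => l ++ [v])             -- invertedIndex[token].append(v)
    else
      inv

def posting (sortedToken : List (List (String × Int))) : List (String × List Int) :=
  (sortedToken.foldl postingStepA PySem.Dict.empty).items

-- ===== PORT B =====
-- one loop step of B: groups.setdefault(token, []).append(tokenPair[token])
def postingStepB (g : PySem.Dict String (List Int)) (tokenPair : List (String × Int)) :
    PySem.Dict String (List Int) :=
  match PySem.List.pyGet? (PySem.Dict.ofList tokenPair).keys 0 with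
  | none => g        -- Python raises IndexError here (empty dict); excluded by Pre_posting
  | some token => g.modify token [] (fun l => l ++ [(PySem.Dict.ofList tokenPair).getD token 0])

def posting_alt (sortedToken : List (List (String × Int))) : List (String × List Int) :=
  let groups := sortedToken.foldl postingStepB PySem.Dict.empty
  groups.items.map (fun p => (p.1, PySem.List.dedup p.2))   -- list(dict.fromkeys(posts))

-- ===== PRECONDITION & SPEC =====
-- Pre_ excludes inputs containing an empty dict, on which A (and B) raise IndexError at list(tokenPair.keys())[0].
def Pre_posting (sortedToken : List (List (String × Int))) : Prop :=
  ∀ tp ∈ sortedToken, tp ≠ []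
instance (sortedToken : List (List (String × Int))) : Decidable (Pre_posting sortedToken) := by unfold Pre_posting; infer_instance

def pvWitness_posting : (List (List (String × Int))) :=
  [[("a", 1)], [("b", 2)], [("a", 1)], [("a", 3)]]

def Spec_posting (sortedToken : List (List (String × Int))) (out : List (String × List Int)) : Prop := out = posting_alt sortedToken
instance (sortedToken : List (List (String × Int))) (out : List (String × List Int)) : Decidable (Spec_posting sortedToken out) := by unfold Spec_posting; infer_instance

-- ===== CLAIM (what is proved, stated in full; the proofs are below) =====
def Claim_equal_posting : Prop := ∀ (sortedToken : List (List (String × Int))), Dom_posting sortedToken → Pre_posting sortedToken → Spec_posting sortedToken (posting sortedToken)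

-- ===== LEMMAS AND PROOFS =====

-- the simulation map: B's grouping dict, with every value list deduplicated, is A's dict
def mapd (g : PySem.Dict String (List Int)) : PySem.Dict String (List Int) :=
  PySem.Dict.mk (g.items.map (fun p => (p.1, PySem.List.dedup p.2)))

lemma comp_fst_pred (k : String) :
    ((fun p : String × List Int => p.1 == k) ∘ (fun p : String × List Int => (p.1, PySem.List.dedup p.2)))
      = (fun p : String × List Int => p.1 == k) := rfl

lemma contains_mapd (g : PySem.Dict String (List Int)) (k : String) :
    (mapd g).contains k = g.contains k := by
  simp only [mapd, PySem.Dict.contains, List.any_map, comp_fst_pred]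

lemma get?_mapd (g : PySem.Dict String (List Int)) (k : String) :
    (mapd g).get? k = (g.get? k).map PySem.List.dedup := by
  simp only [mapd, PySem.Dict.get?, List.find?_map, comp_fst_pred]
  cases List.find? (fun p => p.1 == k) g.items <;> rfl

lemma ofList_append_singleton (ps : List Int) (v : Int) :
    PySem.Set.ofList (ps ++ [v]) = PySem.Set.add (PySem.Set.ofList ps) v := by
  simp [PySem.Set.ofList, List.foldl_append]

lemma dedup_append_mem {v : Int} {ps : List Int} (h : v ∈ ps) :
    PySem.List.dedup (ps ++ [v]) = PySem.List.dedup ps := by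
  rw [PySem.List.dedup, PySem.List.dedup, ofList_append_singleton]
  have hc : (PySem.Set.ofList ps).contains v = true := by
    simp only [PySem.Set.contains, List.contains_iff_mem, PySem.Set.mem_ofList]
    exact h
  rw [PySem.Set.add, if_pos hc]

lemma dedup_append_not_mem {v : Int} {ps : List Int} (h : v ∉ ps) :
    PySem.List.dedup (ps ++ [v]) = PySem.List.dedup ps ++ [v] := by
  rw [PySem.List.dedup, PySem.List.dedup, ofList_append_singleton]
  have hc : (PySem.Set.ofList ps).contains v = false := by
    cases hx : (PySem.Set.ofList ps).contains v
    · rfl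
    · exact absurd ((PySem.Set.mem_ofList ps v).mp (List.contains_iff_mem.mp hx)) h
  rw [PySem.Set.add, if_neg (by rw [hc]; simp)]

lemma step_comm (g : PySem.Dict String (List Int)) (hnd : g.keys.Nodup)
    (tp : List (String × Int)) :
    postingStepA (mapd g) tp = mapd (postingStepB g tp) := by
  unfold postingStepA postingStepB
  cases hk : PySem.List.pyGet? (PySem.Dict.ofList tp).keys 0 with
  | none => rfl
  | some token =>
    simp only [PySem.Dict.modify]
    set v := (PySem.Dict.ofList tp).getD token 0 with hv
    by_cases hc : g.contains token = true
    · -- token already a key of g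
      obtain ⟨ps, hps⟩ : ∃ ps, g.get? token = some ps := by
        rw [PySem.Dict.contains_eq_isSome_get?] at hc
        cases hg : g.get? token
        · rw [hg] at hc; simp at hc
        · exact ⟨_, rfl⟩
      have hgetD : g.getD token [] = ps := by simp [PySem.Dict.getD, hps]
      have hcm : (mapd g).contains token = true := by rw [contains_mapd]; exact hc
      have hgetDm : (mapd g).getD token [] = PySem.List.dedup ps := by
        simp [PySem.Dict.getD, get?_mapd, hps]
      rw [if_neg (by simp [hcm])]
      have hval : ∀ p ∈ g.items, (p.1 == token) = true → p.2 = ps := by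
        intro p hp heq
        have h2 : g.get? p.1 = some p.2 := PySem.Dict.get?_of_mem_items g (by exact hp) hnd
        rw [eq_of_beq heq, hps] at h2
        exact (Option.some.inj h2).symm
      have hmemset : ∀ w : Int, ((PySem.Set.ofList ((mapd g).getD token [])).contains w = true) ↔ w ∈ ps := by
        intro w
        rw [hgetDm]
        simp only [PySem.Set.contains, List.contains_iff_mem, PySem.Set.mem_ofList,
          PySem.List.mem_dedup]
      by_cases hmem : v ∈ ps
      · -- duplicate posting: A leaves the dict unchanged, B appends and dedup removes it
        have hX : (PySem.Set.ofList ((mapd g).getD token [])).contains v = true :=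
          (hmemset v).mpr hmem
        rw [if_neg (by rw [hcm, hX]; simp)]
        apply PySem.Dict.ext
        show g.items.map _ = ((g.insert token (g.getD token [] ++ [v])).items).map _
        rw [PySem.Dict.items_insert_of_contains _ _ hc, List.map_map]
        apply List.map_congr_left
        intro p hp
        by_cases hb : (p.1 == token) = true
        · simp only [Function.comp_apply, hb, if_pos]
          show (p.1, PySem.List.dedup p.2) = (token, PySem.List.dedup (g.getD token [] ++ [v]))
          rw [hgetD, dedup_append_mem hmem, hval p hp hb, eq_of_beq hb]
        · simp [Function.comp, hb]
      · -- new posting: both append it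
        have hX : (PySem.Set.ofList ((mapd g).getD token [])).contains v = false := by
          cases hx : (PySem.Set.ofList ((mapd g).getD token [])).contains v
          · rfl
          · exact absurd ((hmemset v).mp hx) hmem
        rw [if_pos (by rw [hcm, hX]; rfl)]
        rw [hgetDm]
        apply PySem.Dict.ext
        show ((mapd g).insert token (PySem.List.dedup ps ++ [v])).items
            = ((g.insert token (g.getD token [] ++ [v])).items).map _
        rw [PySem.Dict.items_insert_of_contains _ _ hcm,
          PySem.Dict.items_insert_of_contains _ _ hc, List.map_map]
        show ((g.items.map _).map _) = _
        rw [List.map_map]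
        apply List.map_congr_left
        intro p hp
        by_cases hb : (p.1 == token) = true
        · simp only [Function.comp_apply, hb, if_pos]
          show (token, PySem.List.dedup ps ++ [v]) = (token, PySem.List.dedup (g.getD token [] ++ [v]))
          rw [hgetD, dedup_append_not_mem hmem]
        · simp [Function.comp, hb]
    · -- token fresh: both append a new entry
      have hcf : g.contains token = false := by revert hc; cases g.contains token <;> simp
      have hcm : (mapd g).contains token = false := by rw [contains_mapd]; exact hcf
      rw [if_pos hcm, PySem.Dict.getD_of_not_contains _ _ hcf]
      apply PySem.Dict.ext
      show ((mapd g).insert token [v]).items = ((g.insert token ([] ++ [v])).items).map _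
      rw [PySem.Dict.items_insert_of_not_contains _ _ hcm,
        PySem.Dict.items_insert_of_not_contains _ _ hcf, List.map_append]
      rfl

lemma keys_stepB (g : PySem.Dict String (List Int)) (hnd : g.keys.Nodup)
    (tp : List (String × Int)) : (postingStepB g tp).keys.Nodup := by
  unfold postingStepB
  cases PySem.List.pyGet? (PySem.Dict.ofList tp).keys 0 with
  | none => exact hnd
  | some token => exact PySem.Dict.nodup_keys_insert g token _ hnd

lemma fold_comm (l : List (List (String × Int))) (g : PySem.Dict String (List Int))
    (hnd : g.keys.Nodup) :
    l.foldl postingStepA (mapd g) = mapd (l.foldl postingStepB g) := by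
  induction l generalizing g with
  | nil => rfl
  | cons tp l ih =>
      simp only [List.foldl_cons, step_comm g hnd tp]
      exact ih _ (keys_stepB g hnd tp)

-- ===== VERDICT (by name: the statement is the Claim_ definition above) =====
theorem posting_spec : Claim_equal_posting := by
  intro st _ _
  unfold Spec_posting posting posting_alt
  have h := fold_comm st PySem.Dict.empty (by simp [PySem.Dict.keys, PySem.Dict.empty])
  have he : mapd PySem.Dict.empty = PySem.Dict.empty := rfl
  rw [he] at h
  rw [h]
  rfl
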